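-- pv_equiv track=rewrite | github.com/ShafiBotAI/CreatorCoreForge | generated/CoreForgeVisual/Highlight_visual_identity_conflicts_for_creator_review_e_g_two_similar_characters.py | highlight_visual_identity
-- ===== SOURCE A (Python) =====
-- from typing import List, Tuple
--
-- def highlight_visual_identity(characters: List[Tuple[str, str]]) -> List[Tuple[str, str]]:
--     """Return pairs of character names that have identical appearances."""
--     conflicts = []
--     seen = {}
--     for name, appearance in characters:
--         if appearance in seen and seen[appearance] != name:
--             conflicts.append((seen[appearance], name))
--         else:
--             seen[appearance] = name
--     return conflicts
-- ===== SOURCE B (Python) =====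
-- def highlight_visual_identity(characters):
--     """Return pairs of character names that have identical appearances."""
--     anchor = {}
--     for name, appearance in characters:
--         if appearance not in anchor:
--             anchor[appearance] = name
--     return [(anchor[appearance], name)
--             for name, appearance in characters
--             if anchor[appearance] != name]
-- ===== Notes on version B (the rewrite author's own statement) =====
-- stated objective: alternative
-- what changed: Replaces the single stateful loop that interleaves dict updates with conflict emission by two independent passes: first build a first-wins anchor dict mapping each appearance to its first name, then a comprehension over the original list emits (anchor, name) for every entry whose name differs from the anchor.
import Mathlib
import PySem

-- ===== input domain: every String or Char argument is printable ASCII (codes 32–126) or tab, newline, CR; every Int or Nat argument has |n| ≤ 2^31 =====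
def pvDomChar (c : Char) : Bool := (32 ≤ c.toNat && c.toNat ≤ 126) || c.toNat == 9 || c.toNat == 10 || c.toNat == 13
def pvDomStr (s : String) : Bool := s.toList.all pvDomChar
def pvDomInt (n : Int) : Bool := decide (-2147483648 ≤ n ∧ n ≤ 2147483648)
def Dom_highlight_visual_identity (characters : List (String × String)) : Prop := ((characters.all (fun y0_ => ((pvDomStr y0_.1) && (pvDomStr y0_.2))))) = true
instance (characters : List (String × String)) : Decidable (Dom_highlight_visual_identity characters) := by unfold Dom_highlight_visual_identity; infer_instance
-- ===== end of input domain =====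

-- B is a two-pass alternative (first-wins anchor dict, then a comprehension); same O(n) cost, no speed claim.

-- ===== PORT A =====
-- A's single loop: interleaves dict updates with conflict emission.
def hviGo : List (String × String) → List (String × String) → PySem.Dict String String → List (String × String)
  | [], conflicts, _ => conflicts
  | (name, app) :: rest, conflicts, seen =>
    match seen.get? app with
    | some prev =>
      if prev ≠ name then hviGo rest (conflicts ++ [(prev, name)]) seen
      else hviGo rest conflicts (seen.insert app name)
    | none => hviGo rest conflicts (seen.insert app name)

def highlight_visual_identity (characters : List (String × String)) : List (String × String) :=
  hviGo characters [] PySem.Dict.empty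

-- ===== PORT B =====
-- first pass: anchor[appearance] = first name seen for that appearance
def hviAnchor : List (String × String) → PySem.Dict String String → PySem.Dict String String
  | [], d => d
  | (name, app) :: rest, d =>
    hviAnchor rest (if d.contains app then d else d.insert app name)

def highlight_visual_identity_alt (characters : List (String × String)) : List (String × String) :=
  let anchor := hviAnchor characters PySem.Dict.empty
  characters.filterMap (fun p =>
    match anchor.get? p.2 with
    | some a => if a ≠ p.1 then some (a, p.1) else none
    | none => none)

-- ===== PRECONDITION & SPEC =====
def Spec_highlight_visual_identity (characters : List (String × String)) (out : List (String × String)) : Prop := out = highlight_visual_identity_alt characters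
instance (characters : List (String × String)) (out : List (String × String)) : Decidable (Spec_highlight_visual_identity characters out) := by unfold Spec_highlight_visual_identity; infer_instance

-- ===== CLAIM (what is proved, stated in full; the proofs are below) =====
def Claim_equal_highlight_visual_identity : Prop := ∀ (characters : List (String × String)), Dom_highlight_visual_identity characters → Spec_highlight_visual_identity characters (highlight_visual_identity characters)

-- ===== LEMMAS AND PROOFS =====

-- first name paired with appearance k in the list, if any
def firstName : List (String × String) → String → Option String
  | [], _ => none
  | (n, a) :: rest, k => if a = k then some n else firstName rest k

lemma firstName_append (l1 l2 : List (String × String)) (k : String) :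
    firstName (l1 ++ l2) k = (firstName l1 k).or (firstName l2 k) := by
  induction l1 with
  | nil => simp [firstName]
  | cons p t ih =>
    obtain ⟨n, a⟩ := p
    by_cases h : a = k <;> simp [firstName, h, ih]

lemma hviAnchor_get? (l : List (String × String)) (d : PySem.Dict String String) (k : String) :
    (hviAnchor l d).get? k = (d.get? k).or (firstName l k) := by
  induction l generalizing d with
  | nil => simp [hviAnchor, firstName]
  | cons p t ih =>
    obtain ⟨n, a⟩ := p
    rw [hviAnchor, ih]
    have hstep : (if d.contains a then d else d.insert a n).get? k
        = (d.get? k).or (if a = k then some n else none) := by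
      by_cases hc : d.contains a
      · rw [if_pos hc]
        by_cases hk : a = k
        · subst hk
          rw [PySem.Dict.contains_eq_isSome_get?] at hc
          obtain ⟨v, hv⟩ := Option.isSome_iff_exists.mp hc
          simp [hv]
        · simp [hk]
      · rw [if_neg hc]
        by_cases hk : a = k
        · subst hk
          rw [PySem.Dict.contains_eq_isSome_get?] at hc
          simp only [Bool.not_eq_true, Option.isSome_eq_false_iff, Option.isNone_iff_eq_none] at hc
          simp [PySem.Dict.get?_insert_self, hc]
        · rw [PySem.Dict.get?_insert_of_ne _ _ (Ne.symm hk)]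
          simp [hk]
    rw [hstep, Option.or_assoc]
    congr 1
    by_cases hk : a = k <;> simp [firstName, hk]

lemma hviGo_spec (cs : List (String × String)) :
    ∀ (rest pre conflicts : List (String × String)) (seen : PySem.Dict String String),
    cs = pre ++ rest → (∀ k, seen.get? k = firstName pre k) →
    hviGo rest conflicts seen
      = conflicts ++ rest.filterMap (fun p =>
          match firstName cs p.2 with
          | some a => if a ≠ p.1 then some (a, p.1) else none
          | none => none) := by
  intro rest
  induction rest with
  | nil => intro pre conflicts seen _ _; simp [hviGo]
  | cons p t ih =>
    intro pre conflicts seen hcs hseen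
    obtain ⟨name, app⟩ := p
    have hfn : firstName cs app = (firstName pre app).or (firstName ((name, app) :: t) app) := by
      rw [hcs, firstName_append]
    rw [hviGo]
    rcases h : seen.get? app with _ | prev
    · -- app not yet seen: anchor is this name, no conflict emitted
      have hpre : firstName pre app = none := by rw [← hseen, h]
      have hcsapp : firstName cs app = some name := by
        rw [hfn, hpre]; simp [firstName]
      have hins : ∀ k, (seen.insert app name).get? k = firstName (pre ++ [(name, app)]) k := by
        intro k
        rw [firstName_append, ← hseen]
        by_cases hk : k = app
        · subst hk; rw [PySem.Dict.get?_insert_self, h]; simp [firstName]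
        · rw [PySem.Dict.get?_insert_of_ne _ _ hk]
          simp [firstName, Ne.symm hk]
      rw [ih (pre ++ [(name, app)]) conflicts (seen.insert app name)
            (by rw [hcs, List.append_assoc]; rfl) hins]
      simp [hcsapp]
    · have hpre : firstName pre app = some prev := by rw [← hseen, h]
      have hcsapp : firstName cs app = some prev := by rw [hfn, hpre]; rfl
      dsimp only
      by_cases hne : prev ≠ name
      · rw [if_pos hne]
        have hins' : ∀ k, seen.get? k = firstName (pre ++ [(name, app)]) k := by
          intro k
          rw [firstName_append, ← hseen]
          by_cases hk : k = app
          · subst hk; rw [h]; rfl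
          · simp [firstName, Ne.symm hk]
        rw [ih (pre ++ [(name, app)]) (conflicts ++ [(prev, name)]) seen
              (by rw [hcs, List.append_assoc]; rfl) hins']
        simp [hcsapp, hne]
      · rw [if_neg hne]
        rw [not_not] at hne
        subst hne
        have hins' : ∀ k, (seen.insert app prev).get? k = firstName (pre ++ [(prev, app)]) k := by
          intro k
          rw [firstName_append, ← hseen]
          by_cases hk : k = app
          · subst hk; rw [PySem.Dict.get?_insert_self, h]; rfl
          · rw [PySem.Dict.get?_insert_of_ne _ _ hk]
            simp [firstName, Ne.symm hk]
        rw [ih (pre ++ [(prev, app)]) conflicts (seen.insert app prev)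
              (by rw [hcs, List.append_assoc]; rfl) hins']
        simp [hcsapp]

-- ===== VERDICT (by name: the statement is the Claim_ definition above) =====
theorem highlight_visual_identity_spec : Claim_equal_highlight_visual_identity := by
  intro cs _
  unfold Spec_highlight_visual_identity highlight_visual_identity highlight_visual_identity_alt
  rw [hviGo_spec cs cs [] [] PySem.Dict.empty rfl
        (by intro k; simp [PySem.Dict.get?_empty, firstName])]
  simp only [List.nil_append]
  exact List.filterMap_congr (fun p _ => by rw [hviAnchor_get? cs PySem.Dict.empty p.2,
    PySem.Dict.get?_empty, Option.none_or])
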